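-- pv_equiv track=rewrite | github.com/RafailFridman/TF-IDF | TF_DICT.py | hemming_distance
-- ===== SOURCE A (Python) =====
-- def common_vector(splited_texts):
--     # input list
--     all_words = []
--     for text in splited_texts:
--         all_words.extend(text)
--     all_words=list(set(all_words))
--     return all_words
--
-- def hemming_distance(first,second):
--     # input lists
--     all_words = common_vector([first,second])
--     first_list=[]
--     second_list=[]
--     for word in all_words:
--         if word in first:
--             first_list.append(1)
--         else:
--             first_list.append(0)
--         if word in second:
--             second_list.append(1)
--         else:
--            second_list.append(0)
--     distance = 0
--     for i in range(len(first_list)):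
--         if first_list[i] != second_list[i]:
--             distance+=1
--     return distance
-- ===== SOURCE B (Python) =====
-- def hemming_distance(first, second):
--     # input lists
--     return len(set(first) ^ set(second))
-- ===== Notes on version B (the rewrite author's own statement) =====
-- stated objective: faster
-- what changed: Replaces the dedup-then-membership-scan construction of two 0/1 presence vectors and an index loop comparing them by a single set symmetric difference whose size is the answer.
import Mathlib
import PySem

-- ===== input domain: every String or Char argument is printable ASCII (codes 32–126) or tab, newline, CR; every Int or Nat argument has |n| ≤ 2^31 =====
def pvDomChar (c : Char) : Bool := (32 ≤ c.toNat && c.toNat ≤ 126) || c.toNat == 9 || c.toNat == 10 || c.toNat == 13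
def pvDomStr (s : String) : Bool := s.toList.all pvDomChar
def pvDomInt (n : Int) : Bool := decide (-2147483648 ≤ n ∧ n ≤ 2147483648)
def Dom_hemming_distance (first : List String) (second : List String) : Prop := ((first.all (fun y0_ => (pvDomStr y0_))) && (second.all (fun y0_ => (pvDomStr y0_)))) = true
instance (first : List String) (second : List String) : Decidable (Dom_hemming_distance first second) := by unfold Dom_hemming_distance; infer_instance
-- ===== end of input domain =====

-- B computes the same distance as the size of the symmetric difference of the two word sets
-- (O(n+m) instead of A's quadratic membership scans); return values agree on all inputs.
-- A iterates over list(set(...)) only to accumulate an order-independent count, so the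
-- Set.ofList iteration order used below is value-exact.

-- ===== PORT A =====
def common_vector (splited_texts : List (List String)) : List String :=
  -- all_words = []; for text in …: all_words.extend(text); all_words = list(set(all_words))
  let all_words := splited_texts.foldl (fun acc text => acc ++ text) []
  PySem.Set.ofList all_words

def hemming_distance (first : List String) (second : List String) : Int :=
  let all_words := common_vector [first, second]
  -- for word in all_words: append 1/0 to first_list and to second_list
  let p := all_words.foldl
    (fun (p : List Int × List Int) word =>
      (p.1 ++ [if first.contains word then (1 : Int) else 0],
       p.2 ++ [if second.contains word then (1 : Int) else 0]))
    ([], [])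
  let first_list := p.1
  let second_list := p.2
  -- for i in range(len(first_list)): if first_list[i] != second_list[i]: distance += 1
  (PySem.List.pyRange 0 (first_list.length : Int) 1).foldl
    (fun distance i =>
      if PySem.List.pyGetD first_list i 0 ≠ PySem.List.pyGetD second_list i 0 then distance + 1
      else distance)
    0

-- ===== PORT B =====
def hemming_distance_alt (first : List String) (second : List String) : Int :=
  -- len(set(first) ^ set(second))
  PySem.Set.len (PySem.Set.symmDiff (PySem.Set.ofList first) (PySem.Set.ofList second))

-- ===== PRECONDITION & SPEC =====
def Spec_hemming_distance (first : List String) (second : List String) (out : Int) : Prop := out = hemming_distance_alt first second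
instance (first : List String) (second : List String) (out : Int) : Decidable (Spec_hemming_distance first second out) := by unfold Spec_hemming_distance; infer_instance

-- ===== CLAIM (what is proved, stated in full; the proofs are below) =====
def Claim_equal_hemming_distance : Prop := ∀ (first : List String) (second : List String), Dom_hemming_distance first second → Spec_hemming_distance first second (hemming_distance first second)

-- ===== LEMMAS AND PROOFS =====

-- The pair-building loop produces the two 0/1 vectors as maps.
theorem pv_pair_fold {α : Type} (g1 g2 : α → Int) (l : List α) (a b : List Int) :
    l.foldl (fun (p : List Int × List Int) w => (p.1 ++ [g1 w], p.2 ++ [g2 w])) (a, b)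
      = (a ++ l.map g1, b ++ l.map g2) := by
  induction l generalizing a b with
  | nil => simp
  | cons x xs ih => simp [List.foldl_cons, ih, List.append_assoc]

-- The index loop over two equal-length mapped vectors counts the words where g1, g2 disagree.
theorem pv_range_count {α : Type} (g1 g2 : α → Int) (l : List α) :
    (List.range l.length).foldl
      (fun distance k =>
        if (l.map g1).getD k 0 ≠ (l.map g2).getD k 0 then distance + 1 else distance) 0
      = (l.countP (fun w => g1 w ≠ g2 w) : Int) := by
  induction l using List.reverseRecOn with
  | nil => simp
  | append_singleton ys x ih =>
    rw [List.length_append, List.length_singleton, List.range_succ, List.foldl_append]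
    have hcon : ∀ (acc : Int), ∀ k ∈ List.range ys.length,
        (fun (distance : Int) (k : Nat) =>
          if ((ys ++ [x]).map g1).getD k 0 ≠ ((ys ++ [x]).map g2).getD k 0 then distance + 1
          else distance) acc k
        = (fun (distance : Int) (k : Nat) =>
          if (ys.map g1).getD k 0 ≠ (ys.map g2).getD k 0 then distance + 1 else distance) acc k := by
      intro acc k hk
      have hk' : k < ys.length := List.mem_range.mp hk
      simp only [List.map_append,
        List.getD_append (ys.map g1) _ 0 k (by simpa using hk'),
        List.getD_append (ys.map g2) _ 0 k (by simpa using hk')]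
    rw [PySem.List.foldl_congr_mem _ _ _ _ hcon, ih]
    have hx1 : ((ys ++ [x]).map g1).getD ys.length 0 = g1 x := by
      simp [List.map_append, List.getD_eq_getElem?_getD]
    have hx2 : ((ys ++ [x]).map g2).getD ys.length 0 = g2 x := by
      simp [List.map_append, List.getD_eq_getElem?_getD]
    simp only [List.foldl_cons, List.foldl_nil, hx1, hx2, List.countP_append, List.countP_cons,
      List.countP_nil]
    by_cases h : g1 x ≠ g2 x <;> simp [h]

-- Bridge from the pyRange/pyGetD loop of the port to the Nat index loop above.
theorem pv_index_loop {α : Type} (g1 g2 : α → Int) (l : List α) :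
    (PySem.List.pyRange 0 ((l.map g1).length : Int) 1).foldl
      (fun distance i =>
        if PySem.List.pyGetD (l.map g1) i 0 ≠ PySem.List.pyGetD (l.map g2) i 0 then distance + 1
        else distance) 0
      = (l.countP (fun w => g1 w ≠ g2 w) : Int) := by
  rw [List.length_map, PySem.List.pyRange_zero_natCast, List.foldl_map]
  have hcongr : ∀ (acc : Int), ∀ k ∈ List.range l.length,
      (fun (distance : Int) (k : Nat) =>
        if PySem.List.pyGetD (l.map g1) (k : Int) 0 ≠ PySem.List.pyGetD (l.map g2) (k : Int) 0
        then distance + 1 else distance) acc k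
      = (fun (distance : Int) (k : Nat) =>
        if (l.map g1).getD k 0 ≠ (l.map g2).getD k 0 then distance + 1 else distance) acc k := by
    intro acc k _
    simp [PySem.List.pyGetD_natCast]
  rw [PySem.List.foldl_congr_mem _ _ _ _ hcongr]
  exact pv_range_count g1 g2 l

-- The words where the two presence bits differ, among the deduped union, are in bijection
-- with the symmetric difference of the two word sets (both are nodup lists with the same
-- membership predicate, hence permutations of each other).
theorem pv_count_eq_symmDiff (first second : List String) :
    ((PySem.Set.ofList (first ++ second)).countP
        (fun w => decide ((if first.contains w then (1 : Int) else 0)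
                        ≠ (if second.contains w then (1 : Int) else 0))) : Int)
      = PySem.Set.len (PySem.Set.symmDiff (PySem.Set.ofList first) (PySem.Set.ofList second)) := by
  have hperm :
      ((PySem.Set.ofList (first ++ second)).filter
        (fun w => decide ((if first.contains w then (1 : Int) else 0)
                        ≠ (if second.contains w then (1 : Int) else 0)))).Perm
      (PySem.Set.symmDiff (PySem.Set.ofList first) (PySem.Set.ofList second)) := by
    rw [List.perm_ext_iff_of_nodup]
    · intro w
      simp only [PySem.Set.symmDiff, PySem.Set.diff, List.mem_append, List.mem_filter,
        PySem.Set.mem_ofList, PySem.Set.contains, List.contains_eq_mem, List.mem_append,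
        Bool.not_eq_eq_eq_not, Bool.not_true, decide_eq_true_eq, decide_eq_false_iff_not]
      by_cases h1 : w ∈ first <;> by_cases h2 : w ∈ second <;> simp [h1, h2]
    · exact (PySem.Set.nodup_ofList _).filter _
    · refine List.Nodup.append ((PySem.Set.nodup_ofList _).filter _)
        ((PySem.Set.nodup_ofList _).filter _) ?_
      intro w hw1 hw2
      simp only [PySem.Set.diff, List.mem_filter, PySem.Set.mem_ofList, PySem.Set.contains,
        List.contains_eq_mem, Bool.not_eq_eq_eq_not, Bool.not_true, decide_eq_false_iff_not] at hw1 hw2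
      exact hw2.2 hw1.1
  rw [List.countP_eq_length_filter]
  simp only [PySem.Set.len]
  exact_mod_cast hperm.length_eq

-- ===== VERDICT (by name: the statement is the Claim_ definition above) =====
theorem hemming_distance_spec : Claim_equal_hemming_distance := by
  intro first second _
  unfold Spec_hemming_distance hemming_distance common_vector
  simp only [List.foldl_cons, List.foldl_nil, List.nil_append]
  simp only [pv_pair_fold (fun w => if first.contains w then (1 : Int) else 0)
        (fun w => if second.contains w then (1 : Int) else 0), List.nil_append]
  rw [pv_index_loop]
  exact pv_count_eq_symmDiff first second
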